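-- pv_equiv track=rewrite | github.com/mintaprapy/funding | run_all_funding_stack.py | parse_minutes
-- ===== SOURCE A (Python) =====
-- def parse_minutes(raw: str) -> list[int]:
--     vals: set[int] = set()
--     for part in raw.split(","):
--         item = part.strip()
--         if not item:
--             continue
--         minute = int(item)
--         if minute < 0 or minute > 59:
--             raise ValueError(f"minute out of range: {minute}")
--         vals.add(minute)
--     out = sorted(vals)
--     if not out:
--         raise ValueError("minute list is empty")
--     return out
-- ===== SOURCE B (Python) =====
-- def parse_minutes(raw: str) -> list[int]:
--     def insert(acc, m):
--         # ordered insertion into a strictly increasing list, skipping duplicates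
--         if not acc or m < acc[0]:
--             return [m] + acc
--         if m == acc[0]:
--             return acc
--         return [acc[0]] + insert(acc[1:], m)
--
--     acc: list[int] = []
--     for part in raw.split(","):
--         item = part.strip()
--         if not item:
--             continue
--         minute = int(item)
--         if minute < 0 or minute > 59:
--             raise ValueError(f"minute out of range: {minute}")
--         acc = insert(acc, minute)
--     if not acc:
--         raise ValueError("minute list is empty")
--     return acc
-- ===== Notes on version B (the rewrite author's own statement) =====
-- stated objective: alternative
-- what changed: Replaces the set accumulator plus a final sorted() pass with an incrementally maintained strictly increasing list: each parsed minute is placed by recursive ordered insertion that skips duplicates, so the result is already sorted and deduplicated when the scan ends and no set or sort is ever used.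
import Mathlib
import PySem

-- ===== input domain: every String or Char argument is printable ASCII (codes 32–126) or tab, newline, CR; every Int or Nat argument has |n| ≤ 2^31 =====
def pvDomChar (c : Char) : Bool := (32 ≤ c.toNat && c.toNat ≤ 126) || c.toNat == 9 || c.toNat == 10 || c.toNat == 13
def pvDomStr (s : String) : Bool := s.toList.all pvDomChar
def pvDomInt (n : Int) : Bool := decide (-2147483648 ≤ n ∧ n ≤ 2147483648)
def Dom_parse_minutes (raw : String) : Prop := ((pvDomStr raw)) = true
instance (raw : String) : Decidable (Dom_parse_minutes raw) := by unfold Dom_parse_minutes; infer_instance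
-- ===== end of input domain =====

-- B replaces the set accumulator plus final sorted() with a strictly increasing list
-- maintained by recursive ordered insertion that skips duplicates: no set, no sort.

-- ===== PORT A =====
-- loop body of A: strip the part, skip empties, parse; on parse failure or out-of-range
-- minute Python raises (those inputs are outside Pre_), else add to the set
def pvStepA (vals : PySem.Set Int) (part : String) : PySem.Set Int :=
  let item := PySem.Str.strip part
  if item = "" then vals
  else match PySem.Int.ofStr? item with
    | none => vals            -- int(item) raises ValueError: excluded by Pre_
    | some minute =>
      if minute < 0 ∨ minute > 59 then vals   -- raise ValueError: excluded by Pre_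
      else PySem.Set.add vals minute

def parse_minutes (raw : String) : List Int :=
  let vals := ((PySem.Str.split? raw ",").getD []).foldl pvStepA PySem.Set.empty
  PySem.List.sorted vals (fun x => x) false
  -- 'if not out: raise ValueError' — the empty case is excluded by Pre_

-- ===== PORT B =====
-- B's helper 'insert': ordered insertion into a strictly increasing list, skipping duplicates
def pvInsert : List Int → Int → List Int
  | [], m => [m]
  | a :: rest, m =>
    if m < a then m :: a :: rest
    else if m = a then a :: rest
    else a :: pvInsert rest m

-- loop body of B: same parse, but ordered-insert the minute into the accumulator
def pvStepB (acc : List Int) (part : String) : List Int :=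
  let item := PySem.Str.strip part
  if item = "" then acc
  else match PySem.Int.ofStr? item with
    | none => acc             -- int(item) raises ValueError: excluded by Pre_
    | some minute =>
      if minute < 0 ∨ minute > 59 then acc    -- raise ValueError: excluded by Pre_
      else pvInsert acc minute

def parse_minutes_alt (raw : String) : List Int :=
  ((PySem.Str.split? raw ",").getD []).foldl pvStepB []
  -- 'if not acc: raise ValueError' — the empty case is excluded by Pre_

-- ===== PRECONDITION & SPEC =====
-- a stripped item is acceptable to A: parses as an int in [0, 59]
def pvOkItem (item : String) : Bool :=
  match PySem.Int.ofStr? item with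
  | none => false
  | some m => decide (0 ≤ m ∧ m ≤ 59)

-- Pre_: A returns normally iff every nonempty stripped item parses to a minute in [0,59]
-- and at least one item is nonempty (else A raises ValueError).
def Pre_parse_minutes (raw : String) : Prop :=
  (∀ part ∈ (PySem.Str.split? raw ",").getD [],
      PySem.Str.strip part = "" ∨ pvOkItem (PySem.Str.strip part) = true) ∧
  (∃ part ∈ (PySem.Str.split? raw ",").getD [], PySem.Str.strip part ≠ "")
instance (raw : String) : Decidable (Pre_parse_minutes raw) := by
  unfold Pre_parse_minutes; infer_instance

def pvWitness_parse_minutes : String := " 5 ,3,5, 59"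

def Spec_parse_minutes (raw : String) (out : List Int) : Prop := out = parse_minutes_alt raw
instance (raw : String) (out : List Int) : Decidable (Spec_parse_minutes raw out) := by
  unfold Spec_parse_minutes; infer_instance

-- ===== CLAIM =====
def Claim_equal_parse_minutes : Prop := ∀ (raw : String), Dom_parse_minutes raw → Pre_parse_minutes raw → Spec_parse_minutes raw (parse_minutes raw)

-- ===== LEMMAS AND PROOFS =====

lemma pvInsert_mem (acc : List Int) (m x : Int) :
    x ∈ pvInsert acc m ↔ x ∈ acc ∨ x = m := by
  induction acc with
  | nil => simp [pvInsert]
  | cons a rest ih =>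
    simp only [pvInsert]
    split_ifs with h1 h2
    · simp; tauto
    · subst h2; simp; tauto
    · simp [ih]; tauto

lemma pvInsert_pairwise (acc : List Int) (m : Int)
    (h : acc.Pairwise (· < ·)) : (pvInsert acc m).Pairwise (· < ·) := by
  induction acc with
  | nil => simp [pvInsert]
  | cons a rest ih =>
    rw [List.pairwise_cons] at h
    obtain ⟨ha, hrest⟩ := h
    simp only [pvInsert]
    split_ifs with h1 h2
    · refine List.pairwise_cons.2 ⟨?_, List.pairwise_cons.2 ⟨ha, hrest⟩⟩
      intro y hy
      rcases List.mem_cons.1 hy with rfl | hy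
      · exact h1
      · exact lt_trans h1 (ha y hy)
    · exact List.pairwise_cons.2 ⟨ha, hrest⟩
    · refine List.pairwise_cons.2 ⟨?_, ih hrest⟩
      intro y hy
      rcases (pvInsert_mem rest m y).1 hy with hy | rfl
      · exact ha y hy
      · omega

-- loop invariant: B's accumulator is a strictly increasing list with the same members as A's set
def pvInv (vals : PySem.Set Int) (acc : List Int) : Prop :=
  vals.Nodup ∧ acc.Pairwise (· < ·) ∧ (∀ x : Int, x ∈ acc ↔ x ∈ vals)

lemma pvInv_step (vals : PySem.Set Int) (acc : List Int) (part : String)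
    (h : pvInv vals acc) : pvInv (pvStepA vals part) (pvStepB acc part) := by
  obtain ⟨hnd, hpw, hmem⟩ := h
  unfold pvStepA pvStepB
  simp only
  split
  · exact ⟨hnd, hpw, hmem⟩
  · split
    · exact ⟨hnd, hpw, hmem⟩
    · rename_i minute
      split
      · exact ⟨hnd, hpw, hmem⟩
      · refine ⟨PySem.Set.nodup_add _ _ hnd, pvInsert_pairwise _ _ hpw, ?_⟩
        intro x
        rw [pvInsert_mem, PySem.Set.mem_add, hmem]

lemma pvInv_foldl (parts : List String) (vals : PySem.Set Int) (acc : List Int)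
    (h : pvInv vals acc) :
    pvInv (parts.foldl pvStepA vals) (parts.foldl pvStepB acc) := by
  induction parts generalizing vals acc with
  | nil => exact h
  | cons p ps ih => exact ih _ _ (pvInv_step _ _ _ h)

-- ===== VERDICT =====
theorem parse_minutes_spec : Claim_equal_parse_minutes := by
  intro raw _ _
  unfold Spec_parse_minutes parse_minutes parse_minutes_alt
  obtain ⟨hnd, hpw, hmem⟩ :=
    pvInv_foldl ((PySem.Str.split? raw ",").getD []) PySem.Set.empty []
      ⟨by simp [PySem.Set.empty], by simp, by simp [PySem.Set.empty]⟩
  refine PySem.List.sorted_eq_of_perm_of_pairwise_lt _ _ _ ?_ hpw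
  have hnda : (((PySem.Str.split? raw ",").getD []).foldl pvStepB []).Nodup :=
    hpw.imp (fun h => ne_of_lt h)
  rw [List.perm_ext_iff_of_nodup hnda hnd]
  exact hmem
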